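-- pv_equiv track=rewrite | github.com/humancipher/Programming_Contest | Programming_Contest/AtCoder/ABC/ABC_100-199/ABC_180-189/ABC_182/ABC_182_E.py | solve
-- ===== SOURCE A (Python) =====
-- def solve(B,L,H,W): #B[i][j]:マス(i,j)がブロックでないかどうか
--     L2 = [[L[i][j] for j in range(W)] for i in range(H)]
--     for i in range(H):
--         for j in range(1,W):
--             L[i][j] = (L[i][j-1] | L[i][j]) & B[i][j]
--         for j in reversed(range(W-1)):
--             L[i][j] = (L[i][j+1] | L[i][j]) & B[i][j]
--
--     for j in range(W):
--         for i in range(1,H):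
--             L2[i][j] = (L2[i-1][j] | L2[i][j]) & B[i][j]
--         for i in reversed(range(H-1)):
--             L2[i][j] = (L2[i+1][j] | L2[i][j]) & B[i][j]
--
--     ans = 0
--     for i in range(H):
--         for j in range(W):
--             if L[i][j] or L2[i][j]:
--                 ans += 1
--
--     return ans
-- ===== SOURCE B (Python) =====
-- def _line_lit(b, l):
--     # segment the line into maximal runs of free cells; a run is lit iff it holds a source
--     n = len(b)
--     res = []
--     i = 0
--     while i < n:
--         if b[i] == 0:
--             res.append(False)
--             i += 1
--         else:
--             k = i
--             lit = False
--             while k < n and b[k] != 0: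
--                 if l[k] != 0:
--                     lit = True
--                 k += 1
--             res.extend([lit] * (k - i))
--             i = k
--     return res
--
-- def solve(B, L, H, W):
--     h = max(0, H)
--     w = max(0, W)
--     rb = [row[:w] for row in B[:h]]
--     rl = [row[:w] for row in L[:h]]
--     horiz = [_line_lit(b, l) for b, l in zip(rb, rl)]
--     vert_t = [_line_lit(list(b), list(l)) for b, l in zip(zip(*rb), zip(*rl))]
--     return sum(1 for i in range(h) for j in range(w)
--                if horiz[i][j] or vert_t[j][i])
-- ===== Notes on version B (the rewrite author's own statement) =====
-- stated objective: simpler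
-- what changed: Replaces A's in-place forward+backward bitwise relaxation sweeps over every row and column by a single run-segmentation pass per line (split each line into maximal runs of free cells, a run is lit iff it contains a source), then counts cells lit horizontally or vertically.
-- outside the precondition, e.g. on solve([[1, 2]], [[1, 0]], 1, 2): A returns 1, B returns 2; on solve([[0, 1]], [[1, 0]], 1, 2): A returns 2, B returns 0
import Mathlib
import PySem

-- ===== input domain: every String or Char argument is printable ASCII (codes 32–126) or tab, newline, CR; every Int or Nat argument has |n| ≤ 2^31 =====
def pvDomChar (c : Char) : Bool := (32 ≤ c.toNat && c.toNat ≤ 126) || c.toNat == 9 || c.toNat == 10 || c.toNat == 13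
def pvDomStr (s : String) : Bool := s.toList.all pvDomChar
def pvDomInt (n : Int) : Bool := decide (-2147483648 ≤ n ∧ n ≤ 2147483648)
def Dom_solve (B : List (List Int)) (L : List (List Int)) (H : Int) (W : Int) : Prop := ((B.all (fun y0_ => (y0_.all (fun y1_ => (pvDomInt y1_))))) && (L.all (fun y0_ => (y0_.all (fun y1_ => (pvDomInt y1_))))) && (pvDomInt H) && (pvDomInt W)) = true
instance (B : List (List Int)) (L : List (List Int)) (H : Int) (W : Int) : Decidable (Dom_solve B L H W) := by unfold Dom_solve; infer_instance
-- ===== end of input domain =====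

-- B replaces A's in-place forward+backward bitwise relaxation sweeps by run-segmentation of each
-- line into maximal free runs (a run is lit iff it contains a source); equivalence is about the
-- RETURN value only (Python A mutates its argument L in place, B does not).

-- ===== PORT A =====
-- A works on one line at a time (rows, then columns of the fresh copy L2); a line is ported as
-- the list of (B-cell, L-cell) pairs.  'for j in range(1,W): L[i][j] = (L[i][j-1]|L[i][j]) & B[i][j]'
-- with L[i][j-1] already updated is the carry recursion fwdSweep; the reversed loop is lineBwd,
-- whose second component is the updated value at the current head (what the next cell to the
-- left reads as L[i][j+1]).
def fwdSweep : Int → List (Int × Int) → List (Int × Int)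
  | _, [] => []
  | c, (b, x) :: r =>
    let y := Int.land (Int.lor c x) b
    (b, y) :: fwdSweep y r

-- j = 0 is not touched by the forward loop
def lineFwd : List (Int × Int) → List (Int × Int)
  | [] => []
  | (b, x) :: r => (b, x) :: fwdSweep x r

-- the backward loop: j = W-1 is not touched, each cell reads the already-updated right neighbour
def lineBwd : List (Int × Int) → List Int × Int
  | [] => ([], 0)
  | [(_, x)] => ([x], x)
  | (b, x) :: p :: r =>
    let (ys, n) := lineBwd (p :: r)
    let v := Int.land (Int.lor n x) b
    (v :: ys, v)

def lineA (zl : List (Int × Int)) : List Int := (lineBwd (lineFwd zl)).1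

-- A reads only cells (i,j) with i<H, j<W, so the grid is cut to H×W first; the column pass on L2
-- (a fresh copy of L) is the same sweep applied to each extracted column j (exactly A's values,
-- computed column by column as A's 'for j in range(W)' loop does), and the final count reads
-- L2[i][j] as column j at position i.
def solve (B : List (List Int)) (L : List (List Int)) (H : Int) (W : Int) : Int :=
  let hN := H.toNat
  let wN := W.toNat
  let zrows := ((B.take hN).zip (L.take hN)).map (fun p => (p.1.take wN).zip (p.2.take wN))
  let Lh := zrows.map lineA
  let Lv := (List.range wN).map (fun j => lineA (zrows.map (fun r => r.getD j (0, 0))))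
  ((List.range hN).map (fun i =>
    ((List.range wN).map (fun j =>
      if (Lh.getD i []).getD j 0 ≠ 0 ∨ (Lv.getD j []).getD i 0 ≠ 0 then (1 : Int) else 0)).sum)).sum

-- ===== PORT B =====
-- Source B's _line_lit: walk the line; a block cell is unlit; at the head of a run of free cells
-- scan the whole run (the inner while loop = takeWhile), mark all its cells lit iff the run
-- holds a source, and continue after the run (dropWhile).
def lineLit : List (Int × Int) → List Bool
  | [] => []
  | (b, x) :: r =>
    if b = 0 then false :: lineLit r
    else
      let run := List.takeWhile (fun p => p.1 != 0) ((b, x) :: r)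
      let rest := List.dropWhile (fun p => p.1 != 0) ((b, x) :: r)
      List.replicate run.length (run.any (fun p => p.2 != 0)) ++ lineLit rest
  termination_by zl => zl.length
  decreasing_by
  · simp
  · simp only [List.dropWhile_cons]
    have hb' : ((b, x).1 != 0) = true := by simpa using ‹¬b = 0›
    rw [hb', if_pos rfl]
    exact Nat.lt_succ_of_le (List.length_dropWhile_le _ _)


-- Source B: rows and columns cut to H×W (zip(*..) column extraction ported as per-index column
-- reads, exact on the rectangular shapes Pre_ admits), then count horiz[i][j] or vert_t[j][i]
def solve_alt (B : List (List Int)) (L : List (List Int)) (H : Int) (W : Int) : Int :=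
  let hN := H.toNat
  let wN := W.toNat
  let zrows := ((B.take hN).zip (L.take hN)).map (fun p => (p.1.take wN).zip (p.2.take wN))
  let horiz := zrows.map lineLit
  let vertT := (List.range wN).map (fun j => lineLit (zrows.map (fun r => r.getD j (0, 0))))
  ((List.range hN).map (fun i =>
    ((List.range wN).map (fun j =>
      if (horiz.getD i []).getD j false || (vertT.getD j []).getD i false then (1 : Int) else 0)).sum)).sum

-- ===== PRECONDITION & SPEC =====
-- Pre_ excludes (a) shapes on which A raises IndexError (fewer than H rows, or a touched row
-- shorter than W), and (b) inputs outside the task's natural 0/1-grid domain: grid entries that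
-- are not 0/1 (A then does arbitrary bitwise arithmetic on them) and light sources on block
-- cells (an accidental corner: A lets such a source at the border of a line still spread).
def Pre_solve (B : List (List Int)) (L : List (List Int)) (H : Int) (W : Int) : Prop :=
  H.toNat ≤ B.length ∧ H.toNat ≤ L.length ∧
  ∀ p ∈ (B.take H.toNat).zip (L.take H.toNat),
    W.toNat ≤ p.1.length ∧ W.toNat ≤ p.2.length ∧
    ∀ q ∈ (p.1.take W.toNat).zip (p.2.take W.toNat),
      (q.1 = 0 ∨ q.1 = 1) ∧ (q.2 = 0 ∨ q.2 = 1) ∧ (q.2 = 1 → q.1 = 1)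

instance (B : List (List Int)) (L : List (List Int)) (H : Int) (W : Int) : Decidable (Pre_solve B L H W) := by unfold Pre_solve; infer_instance

def pvWitness_solve : List (List Int) × List (List Int) × Int × Int :=
  ([[1, 0], [1, 1]], [[1, 0], [0, 1]], 2, 2)

def Spec_solve (B : List (List Int)) (L : List (List Int)) (H : Int) (W : Int) (out : Int) : Prop := out = solve_alt B L H W
instance (B : List (List Int)) (L : List (List Int)) (H : Int) (W : Int) (out : Int) : Decidable (Spec_solve B L H W out) := by unfold Spec_solve; infer_instance

-- ===== CLAIM (what is proved, stated in full; the proofs are below) =====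
def Claim_equal_solve : Prop := ∀ (B : List (List Int)) (L : List (List Int)) (H : Int) (W : Int), Dom_solve B L H W → Pre_solve B L H W → Spec_solve B L H W (solve B L H W)

-- ===== LEMMAS AND PROOFS =====

def P01 (x : Int) : Prop := x = 0 ∨ x = 1

def GoodP (p : Int × Int) : Prop := P01 p.1 ∧ P01 p.2 ∧ (p.2 = 1 → p.1 = 1)

def fwdLast : Int → List (Int × Int) → Int
  | c, [] => c
  | c, (b, x) :: r => fwdLast (Int.land (Int.lor c x) b) r

def bwdC : Int → List (Int × Int) → List Int × Int
  | n, [] => ([], n)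
  | n, (b, x) :: r =>
    let (ys, m) := bwdC n r
    let v := Int.land (Int.lor m x) b
    (v :: ys, v)

theorem land_zero (x : Int) : Int.land x 0 = 0 := by
  cases x <;> simp [Int.land, Nat.ldiff]
theorem lor_zero (x : Int) : Int.lor x 0 = x := by
  cases x <;> simp [Int.lor, Nat.ldiff]
theorem land_one (a : Int) (ha : P01 a) : Int.land a 1 = a := by
  rcases ha with h | h <;> subst h <;> decide
theorem lor_P01 (a b : Int) (ha : P01 a) (hb : P01 b) : P01 (Int.lor a b) := by
  rcases ha with h | h <;> rcases hb with h' | h' <;> subst h <;> subst h' <;> first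
    | exact Or.inl (by decide) | exact Or.inr (by decide)
theorem lor_eq_one (a b : Int) (ha : P01 a) (hb : P01 b) :
    Int.lor a b = 1 ↔ (a = 1 ∨ b = 1) := by
  rcases ha with h | h <;> rcases hb with h' | h' <;> subst h <;> subst h' <;> simp <;> decide
theorem lor_zero_left (b : Int) : Int.lor 0 b = b := by
  cases b <;> simp [Int.lor, Nat.ldiff]
theorem zero_land (b : Int) : Int.land 0 b = 0 := by
  cases b <;> simp [Int.land, Nat.ldiff]

theorem fwd_append (c : Int) (u w : List (Int × Int)) :
    fwdSweep c (u ++ w) = fwdSweep c u ++ fwdSweep (fwdLast c u) w := by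
  induction u generalizing c with
  | nil => simp [fwdSweep, fwdLast]
  | cons p r ih => cases p; simp [fwdSweep, fwdLast, ih]

theorem fwdLast_P01 (u : List (Int × Int)) (c : Int) (hc : P01 c)
    (hu : ∀ p ∈ u, p.1 = 1 ∧ P01 p.2) : P01 (fwdLast c u) := by
  induction u generalizing c with
  | nil => exact hc
  | cons p r ih =>
    obtain ⟨b, x⟩ := p
    obtain ⟨hb, hx⟩ := hu (b, x) (by simp)
    subst hb
    have hy : Int.land (Int.lor c x) 1 = Int.lor c x := land_one _ (lor_P01 _ _ hc hx)
    rw [fwdLast, hy]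
    exact ih _ (lor_P01 _ _ hc hx) (fun q hq => hu q (by simp [hq]))

theorem fwdLast_any (u : List (Int × Int)) (c : Int) (hc : P01 c)
    (hu : ∀ p ∈ u, p.1 = 1 ∧ P01 p.2) :
    (fwdLast c u = 1 ↔ (c = 1 ∨ u.any (fun p => p.2 != 0) = true)) := by
  induction u generalizing c with
  | nil => simp [fwdLast]
  | cons p r ih =>
    obtain ⟨b, x⟩ := p
    obtain ⟨hb, hx⟩ := hu (b, x) (by simp)
    subst hb
    have hy : Int.land (Int.lor c x) 1 = Int.lor c x := land_one _ (lor_P01 _ _ hc hx)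
    rw [fwdLast, hy, ih _ (lor_P01 _ _ hc hx) (fun q hq => hu q (by simp [hq])),
      lor_eq_one _ _ hc hx]
    have hxne : (x != 0) = true ↔ x = 1 := by
      rcases hx with h | h <;> subst h <;> simp
    simp [hxne]
    tauto

theorem fwdLast_one (u : List (Int × Int)) (c : Int) (hc : P01 c)
    (hu : ∀ p ∈ u, p.1 = 1 ∧ P01 p.2) (h1 : c = 1) : fwdLast c u = 1 := by
  rw [fwdLast_any u c hc hu]; exact Or.inl h1


theorem bwdC_fwd_run (u : List (Int × Int)) (c n : Int) (hne : u ≠ [])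
    (hc : P01 c) (hn : P01 n) (hu : ∀ p ∈ u, p.1 = 1 ∧ P01 p.2) :
    bwdC n (fwdSweep c u) =
      (List.replicate u.length (Int.lor (fwdLast c u) n), Int.lor (fwdLast c u) n) := by
  induction u generalizing c with
  | nil => simp at hne
  | cons p r ih =>
    obtain ⟨b, x⟩ := p
    obtain ⟨hb, hx⟩ := hu (b, x) (by simp)
    subst hb
    have hyP : P01 (Int.lor c x) := lor_P01 _ _ hc hx
    have hy : Int.land (Int.lor c x) 1 = Int.lor c x := land_one _ hyP
    have hur : ∀ q ∈ r, q.1 = 1 ∧ P01 q.2 := fun q hq => hu q (by simp [hq])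
    cases r with
    | nil =>
      rw [show fwdSweep c [(1, x)] = [(1, Int.lor c x)] by simp [fwdSweep, hy]]
      rw [show fwdLast c [(1, x)] = Int.lor c x by simp [fwdLast, hy]]
      have hV : Int.land (Int.lor n (Int.lor c x)) 1 = Int.lor n (Int.lor c x) :=
        land_one _ (lor_P01 _ _ hn hyP)
      have hcomm : Int.lor n (Int.lor c x) = Int.lor (Int.lor c x) n := by
        rcases hn with h | h <;> rcases hyP with h' | h' <;> rw [h, h'] <;> decide
      simp [bwdC, hcomm]
      exact land_one _ (lor_P01 _ _ hyP hn)
    | cons q r' =>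
      have ihr := ih (Int.lor c x) (by simp) hyP hur
      have hF : P01 (fwdLast (Int.lor c x) (q :: r')) := fwdLast_P01 _ _ hyP hur
      have hV'P : P01 (Int.lor (fwdLast (Int.lor c x) (q :: r')) n) := lor_P01 _ _ hF hn
      have hkey : Int.lor (Int.lor (fwdLast (Int.lor c x) (q :: r')) n) (Int.lor c x)
          = Int.lor (fwdLast (Int.lor c x) (q :: r')) n := by
        rcases hyP with h | h
        · rw [h, lor_zero]
        · have h1 : fwdLast (Int.lor c x) (q :: r') = 1 := fwdLast_one _ _ (Or.inr h) hur h
          rw [h1, h]; rcases hn with h' | h' <;> rw [h'] <;> decide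
      rw [show fwdSweep c ((1, x) :: q :: r') = (1, Int.lor c x) :: fwdSweep (Int.lor c x) (q :: r')
            by simp [fwdSweep, hy],
          show fwdLast c ((1, x) :: q :: r') = fwdLast (Int.lor c x) (q :: r')
            by simp [fwdLast, hy]]
      obtain ⟨qb, qx⟩ := q
      obtain ⟨s, t, hst⟩ : ∃ s t, fwdSweep (Int.lor c x) ((qb, qx) :: r') = s :: t :=
        ⟨_, _, rfl⟩
      rw [hst, bwdC, ← hst, ihr]
      simp only [List.length_cons, List.replicate_succ]
      rw [hkey, land_one _ hV'P]

theorem bwd_fwd_run (u : List (Int × Int)) (c : Int) (hne : u ≠ [])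
    (hc : P01 c) (hu : ∀ p ∈ u, p.1 = 1 ∧ P01 p.2) :
    lineBwd (fwdSweep c u) =
      (List.replicate u.length (fwdLast c u), fwdLast c u) := by
  induction u generalizing c with
  | nil => simp at hne
  | cons p r ih =>
    obtain ⟨b, x⟩ := p
    obtain ⟨hb, hx⟩ := hu (b, x) (by simp)
    subst hb
    have hyP : P01 (Int.lor c x) := lor_P01 _ _ hc hx
    have hy : Int.land (Int.lor c x) 1 = Int.lor c x := land_one _ hyP
    have hur : ∀ q ∈ r, q.1 = 1 ∧ P01 q.2 := fun q hq => hu q (by simp [hq])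
    cases r with
    | nil =>
      rw [show fwdSweep c [(1, x)] = [(1, Int.lor c x)] by simp [fwdSweep, hy],
          show fwdLast c [(1, x)] = Int.lor c x by simp [fwdLast, hy]]
      simp [lineBwd]
    | cons q r' =>
      have ihr := ih (Int.lor c x) (by simp) hyP hur
      have hF : P01 (fwdLast (Int.lor c x) (q :: r')) := fwdLast_P01 _ _ hyP hur
      have hkey : Int.lor (fwdLast (Int.lor c x) (q :: r')) (Int.lor c x)
          = fwdLast (Int.lor c x) (q :: r') := by
        rcases hyP with h | h
        · rw [h, lor_zero]
        · have h1 : fwdLast (Int.lor c x) (q :: r') = 1 := fwdLast_one _ _ (Or.inr h) hur h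
          rw [h1, h]; decide
      rw [show fwdSweep c ((1, x) :: q :: r') = (1, Int.lor c x) :: fwdSweep (Int.lor c x) (q :: r')
            by simp [fwdSweep, hy],
          show fwdLast c ((1, x) :: q :: r') = fwdLast (Int.lor c x) (q :: r')
            by simp [fwdLast, hy]]
      obtain ⟨qb, qx⟩ := q
      obtain ⟨s, t, hst⟩ : ∃ s t, fwdSweep (Int.lor c x) ((qb, qx) :: r') = s :: t :=
        ⟨_, _, rfl⟩
      rw [hst, lineBwd, ← hst, ihr]
      simp only [List.length_cons, List.replicate_succ]
      rw [hkey, land_one _ hF]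

theorem bwd_append (u w : List (Int × Int)) (hw : w ≠ []) :
    lineBwd (u ++ w) = ((bwdC (lineBwd w).2 u).1 ++ (lineBwd w).1, (bwdC (lineBwd w).2 u).2) := by
  induction u with
  | nil => simp [bwdC]
  | cons p r ih =>
    obtain ⟨b, x⟩ := p
    have hne : r ++ w ≠ [] := by simp [hw]
    obtain ⟨q, t, hqt⟩ := List.exists_cons_of_ne_nil hne
    have hco : (b, x) :: r ++ w = (b, x) :: q :: t := by simp [hqt]
    rw [hco, lineBwd, ← hqt, ih]
    simp [bwdC]

theorem lineLit_length (zl : List (Int × Int)) : (lineLit zl).length = zl.length := by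
  induction zl using lineLit.induct with
  | case1 => simp [lineLit]
  | case2 x r ih => rw [lineLit]; simp [ih]
  | case3 b x r hb rest ih =>
    have ih' : (lineLit (List.dropWhile (fun p : Int × Int => p.1 != 0) ((b, x) :: r))).length
        = (List.dropWhile (fun p : Int × Int => p.1 != 0) ((b, x) :: r)).length := ih
    rw [lineLit, if_neg hb]
    simp only [List.length_append, List.length_replicate, ih']
    have hlen := congrArg List.length
      (List.takeWhile_append_dropWhile (p := fun p : Int × Int => p.1 != 0) (l := (b, x) :: r))
    rw [List.length_append] at hlen
    exact hlen

theorem ind_any (run : List (Int × Int)) (T : Int) (hTP : P01 T)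
    (hTany : T = 1 ↔ run.any (fun p => p.2 != 0) = true) :
    (if run.any (fun p => p.2 != 0) then (1 : Int) else 0) = T := by
  rcases hTP with h | h
  · rw [h] at hTany
    have : run.any (fun p => p.2 != 0) = false := by
      cases h2 : run.any (fun p => p.2 != 0)
      · rfl
      · exact absurd (hTany.mpr (by rw [h2])) (by norm_num)
    simp [this, h]
  · rw [h] at hTany
    simp [hTany.mp rfl, h]

theorem line_eq (zl : List (Int × Int)) (hg : ∀ p ∈ zl, GoodP p) :
    lineA zl = (lineLit zl).map (fun t => if t then (1 : Int) else 0) := by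
  induction zl using lineLit.induct with
  | case1 => simp [lineA, lineFwd, lineBwd, lineLit]
  | case2 x r ih =>
    obtain ⟨_, hx, hxb⟩ := hg (0, x) (by simp)
    dsimp only at hx hxb
    have hx0 : x = 0 := by
      rcases hx with h | h
      · exact h
      · exact absurd (hxb h) (by norm_num)
    subst hx0
    have hgr : ∀ p ∈ r, GoodP p := fun p hp => hg p (by simp [hp])
    rw [lineLit]
    have hfwd0 : fwdSweep 0 r = lineFwd r := by
      cases r with
      | nil => simp [fwdSweep, lineFwd]
      | cons q t =>
        obtain ⟨b', x'⟩ := q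
        obtain ⟨hb', hx', hxb'⟩ := hgr (b', x') (by simp)
        dsimp only at hx' hxb'
        have hh : Int.land (Int.lor 0 x') b' = x' := by
          rw [lor_zero_left]
          rcases hx' with h | h
          · rw [h]; exact zero_land b'
          · rw [hxb' h, h]; decide
        simp [fwdSweep, lineFwd, hh]
    have hA : lineA ((0, 0) :: r) = 0 :: lineA r := by
      simp only [lineA]
      rw [show lineFwd ((0, 0) :: r) = (0, 0) :: fwdSweep 0 r from rfl, hfwd0]
      cases hlf : lineFwd r with
      | nil => rfl
      | cons s t => rw [lineBwd]; simp [lor_zero, land_zero]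
    rw [hA, ih hgr]
    simp
  | case3 b x r hb rest0 ih =>
    obtain ⟨hbP, hxP, _⟩ := hg (b, x) (by simp)
    dsimp only at hbP hxP
    have hb1 : b = 1 := by rcases hbP with h | h; exact absurd h hb; exact h
    subst hb1
    have hrd : rest0 = List.dropWhile (fun p : Int × Int => p.1 != 0) ((1, x) :: r) := rfl
    rw [lineLit, if_neg hb]
    set q : Int × Int → Bool := fun p => p.1 != 0 with hqdef
    set rt := List.takeWhile q r with hrt
    set rest := List.dropWhile q r with hrest
    have hrun_eq : List.takeWhile q ((1, x) :: r) = (1, x) :: rt := by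
      rw [List.takeWhile_cons_of_pos (by simp [hqdef])]
    have hrest_eq : List.dropWhile q ((1, x) :: r) = rest := by
      rw [List.dropWhile_cons_of_pos (by simp [hqdef])]
    have hr_split : rt ++ rest = r := List.takeWhile_append_dropWhile
    have h00 : rest0 = rest := by rw [hrd]; exact hrest_eq
    rw [h00] at ih
    -- membership facts
    have hrt_mem : ∀ p ∈ rt, p.1 = 1 ∧ P01 p.2 := by
      intro p hp
      have hmem : p ∈ r := (List.takeWhile_sublist q).subset hp
      obtain ⟨hP, hQ, _⟩ := hg p (by simp [hmem])
      have hpt : q p = true := List.mem_takeWhile_imp hp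
      refine ⟨?_, hQ⟩
      rcases hP with h | h
      · rw [hqdef] at hpt; simp [h] at hpt
      · exact h
    have hrun_mem : ∀ p ∈ (1, x) :: rt, p.1 = 1 ∧ P01 p.2 := by
      intro p hp
      rcases List.mem_cons.mp hp with h | h
      · subst h; exact ⟨rfl, hxP⟩
      · exact hrt_mem p h
    have hg_rest : ∀ p ∈ rest, GoodP p :=
      fun p hp => hg p (by simp [(List.dropWhile_sublist q).subset hp])
    -- forward sweep facts
    have hhead : Int.land (Int.lor 0 x) 1 = x := by
      rw [lor_zero_left]; exact land_one _ hxP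
    have hfwd_run : fwdSweep 0 ((1, x) :: rt) = (1, x) :: fwdSweep x rt := by
      rw [fwdSweep]; simp only [hhead]
    have hT_eq : fwdLast 0 ((1, x) :: rt) = fwdLast x rt := by
      rw [fwdLast]; simp only [hhead]
    have hTP : P01 (fwdLast x rt) := hT_eq ▸ fwdLast_P01 _ _ (Or.inl rfl) hrun_mem
    have hTany : fwdLast x rt = 1 ↔ ((1, x) :: rt).any (fun p => p.2 != 0) = true := by
      have h0 := fwdLast_any ((1, x) :: rt) 0 (Or.inl rfl) hrun_mem
      rw [hT_eq] at h0
      simpa using h0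
    have hfull : lineFwd ((1, x) :: r) = fwdSweep 0 ((1, x) :: rt) ++ fwdSweep (fwdLast x rt) rest := by
      rw [lineFwd, hfwd_run, ← hr_split, fwd_append]
      simp
    have hindT := ind_any ((1, x) :: rt) (fwdLast x rt) hTP hTany
    -- case on rest
    rcases hre : rest with _ | ⟨⟨b', x'⟩, t'⟩ <;> rw [hre] at ih hg_rest
    · -- the run reaches the end of the line
      have hA : lineA ((1, x) :: r) = List.replicate ((1, x) :: rt).length (fwdLast x rt) := by
        unfold lineA
        rw [hfull, hre]
        rw [show fwdSweep (fwdLast x rt) ([] : List (Int × Int)) = [] from rfl, List.append_nil,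
          bwd_fwd_run _ 0 (by simp) (Or.inl rfl) hrun_mem, hT_eq]
      rw [hA, hrun_eq, hrest_eq, hre]
      simp only [lineLit, List.append_nil, List.map_replicate, hindT]
    · -- the run is followed by a block cell
      have hb'0 : b' = 0 := by
        have hthis := List.head?_dropWhile_not q r
        rw [← hrest, hre] at hthis
        have hq' : q (b', x') = false := hthis
        simpa [hqdef] using hq'
      subst hb'0
      have hx'0 : x' = 0 := by
        obtain ⟨_, hx'P, hxb'⟩ := hg_rest (0, x') (by simp)
        dsimp only at hx'P hxb'
        rcases hx'P with h | h
        · exact h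
        · exact absurd (hxb' h) (by norm_num)
      subst hx'0
      have hrestF : fwdSweep (fwdLast x rt) ((0, 0) :: t') = (0, 0) :: fwdSweep 0 t' := by
        rw [fwdSweep]
        simp only [lor_zero, land_zero]
      have hrestF_lineFwd : (0, 0) :: fwdSweep 0 t' = lineFwd ((0, 0) :: t') := by
        rw [lineFwd]
      have hcarry0 : (lineBwd (lineFwd ((0, 0) :: t'))).2 = 0 := by
        rw [lineFwd]
        cases hfs : fwdSweep 0 t' with
        | nil => simp [lineBwd]
        | cons s u' => simp [lineBwd, lor_zero, land_zero]
      have hA : lineA ((1, x) :: r) = List.replicate ((1, x) :: rt).length (fwdLast x rt) ++ lineA ((0, 0) :: t') := by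
        unfold lineA
        rw [hfull, hre, hrestF, hrestF_lineFwd,
          bwd_append _ _ (by rw [lineFwd]; simp), hcarry0]
        have hrun := bwdC_fwd_run ((1, x) :: rt) 0 0 (by simp) (Or.inl rfl) (Or.inl rfl) hrun_mem
        rw [hrun, hT_eq, lor_zero]
      rw [hA, hrun_eq, hrest_eq, hre, ih hg_rest]
      simp only [List.map_append, List.map_replicate, hindT]

theorem getD_map_ind (bl : List Bool) (j : Nat) (hj : j < bl.length) :
    (bl.map (fun t => if t then (1 : Int) else 0)).getD j 0
      = if bl.getD j false then 1 else 0 := by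
  rw [List.getD_eq_getElem _ _ (by simpa using hj), List.getD_eq_getElem _ _ hj, List.getElem_map]

theorem solve_eq (B L : List (List Int)) (H W : Int) (hpre : Pre_solve B L H W) :
    solve B L H W = solve_alt B L H W := by
  obtain ⟨hHB, hHL, hrows⟩ := hpre
  simp only [solve, solve_alt]
  set hN := H.toNat with hhN
  set wN := W.toNat with hwN
  set zrows := ((B.take hN).zip (L.take hN)).map (fun p => (p.1.take wN).zip (p.2.take wN)) with hzr
  have hzlen : zrows.length = hN := by
    simp [hzr, List.length_zip]
    omega
  have hz : ∀ k (hk : k < zrows.length), zrows[k].length = wN ∧ ∀ p ∈ zrows[k], GoodP p := by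
    intro k hk
    have hmem : zrows[k] ∈ ((B.take hN).zip (L.take hN)).map (fun p => (p.1.take wN).zip (p.2.take wN)) := hzr ▸ List.getElem_mem hk
    obtain ⟨p, hpZ, hpe⟩ := List.mem_map.mp hmem
    obtain ⟨hW1, hW2, hq⟩ := hrows p hpZ
    constructor
    · rw [← hpe]
      simp [List.length_zip]
      omega
    · intro pq hpq
      rw [← hpe] at hpq
      exact hq pq hpq
  refine congrArg List.sum (List.map_congr_left ?_)
  intro i hi
  refine congrArg List.sum (List.map_congr_left ?_)
  intro j hj
  simp only [List.mem_range] at hi hj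
  have hiz : i < zrows.length := by omega
  have hrowgood := (hz i hiz).2
  have hlitlen : (lineLit zrows[i]).length = wN := by
    rw [lineLit_length]; exact (hz i hiz).1
  have hLh : (zrows.map lineA).getD i []
      = (lineLit zrows[i]).map (fun t => if t then (1 : Int) else 0) := by
    rw [List.getD_eq_getElem _ _ (by simpa using hiz), List.getElem_map]
    exact line_eq _ hrowgood
  have hBh : (zrows.map lineLit).getD i [] = lineLit zrows[i] := by
    rw [List.getD_eq_getElem _ _ (by simpa using hiz), List.getElem_map]
  have hcolgood : ∀ p ∈ zrows.map (fun r => r.getD j (0, 0)), GoodP p := by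
    intro p hp
    obtain ⟨r, hrmem, hre⟩ := List.mem_map.mp hp
    obtain ⟨k, hk, hkr⟩ := List.mem_iff_getElem.mp hrmem
    have hjr : j < r.length := by rw [← hkr]; rw [(hz k hk).1]; omega
    rw [← hre, List.getD_eq_getElem _ _ hjr]
    apply (by rw [← hkr] at *; exact (hz k hk).2 : ∀ p ∈ r, GoodP p)
    exact List.getElem_mem hjr
  have hcollen : (zrows.map (fun r => r.getD j (0, 0))).length = hN := by
    rw [List.length_map]; exact hzlen
  have hcollitlen : (lineLit (zrows.map (fun r => r.getD j (0, 0)))).length = hN := by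
    rw [lineLit_length]; exact hcollen
  have hLv : ((List.range wN).map (fun j => lineA (zrows.map (fun r => r.getD j (0, 0))))).getD j []
      = (lineLit (zrows.map (fun r => r.getD j (0, 0)))).map (fun t => if t then (1 : Int) else 0) := by
    rw [List.getD_eq_getElem _ _ (by simpa using hj), List.getElem_map, List.getElem_range]
    exact line_eq _ hcolgood
  have hBv : ((List.range wN).map (fun j => lineLit (zrows.map (fun r => r.getD j (0, 0))))).getD j []
      = lineLit (zrows.map (fun r => r.getD j (0, 0))) := by
    rw [List.getD_eq_getElem _ _ (by simpa using hj), List.getElem_map, List.getElem_range]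
  rw [hLh, hBh, hLv, hBv,
    getD_map_ind _ j (by omega), getD_map_ind _ i (by omega)]
  cases (lineLit zrows[i]).getD j false <;>
    cases (lineLit (zrows.map (fun r => r.getD j (0, 0)))).getD i false <;> simp

-- ===== VERDICT (by name: the statement is the Claim_ definition above) =====
theorem solve_spec : Claim_equal_solve := by
  intro B L H W _hdom hpre
  unfold Spec_solve
  exact solve_eq B L H W hpre
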